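-- pv_equiv track=rewrite | github.com/shhommychon/CodingSkillTest-old | Python/YSDA01_presemester/200128/07_prgkr_practest.py | solution
-- ===== SOURCE A (Python) =====
-- def solution(answers):
--     answers = ''.join(map(str, answers))
--
--     mathdumb1 = ('12345' * (len(answers) // 5 + 1))[:len(answers)]
--     mathdumb2 = ('21232425' * (len(answers) // 8 + 1))[:len(answers)]
--     mathdumb3 = ('3311224455' * (len(answers) // 10 + 1))[:len(answers)]
--
--     mathdumbs_score = [0, 0, 0]
--     for a, da1, da2, da3 in zip(answers, mathdumb1, mathdumb2, mathdumb3):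
--         if a == da1:
--             mathdumbs_score[0] += 1
--         if a == da2:
--             mathdumbs_score[1] += 1
--         if a == da3:
--             mathdumbs_score[2] += 1
--
--     max_mds = max(mathdumbs_score)
--     max_md = list()
--     for i in range(len(mathdumbs_score)):
--         if mathdumbs_score[i] == max_mds:
--             max_md.append(i+1)
--
--     return max_md
-- ===== SOURCE B (Python) =====
-- def solution(answers):
--     s = ''.join(map(str, answers))
--     # one counting pass: occurrences of each character at each position class mod 40
--     # (40 = lcm of the three pattern periods 5, 8, 10)
--     cnt = {}
--     for i, c in enumerate(s):
--         key = (i % 40, c)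
--         cnt[key] = cnt.get(key, 0) + 1
--     pats = ('12345', '21232425', '3311224455')
--     scores = [sum(cnt.get((r, p[r % len(p)]), 0) for r in range(40)) for p in pats]
--     m = max(scores)
--     return [i + 1 for i, sc in enumerate(scores) if sc == m]
-- ===== Notes on version B (the rewrite author's own statement) =====
-- stated objective: alternative
-- what changed: B replaces A's three tiled pattern strings and the four-way zip comparison loop by a single counting pass that builds a dictionary keyed by (position mod 40, character) (40 = lcm of the pattern periods); each score is then recovered as a sum of 40 dictionary lookups against the pattern, with no per-character pattern comparison.
import Mathlib
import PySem

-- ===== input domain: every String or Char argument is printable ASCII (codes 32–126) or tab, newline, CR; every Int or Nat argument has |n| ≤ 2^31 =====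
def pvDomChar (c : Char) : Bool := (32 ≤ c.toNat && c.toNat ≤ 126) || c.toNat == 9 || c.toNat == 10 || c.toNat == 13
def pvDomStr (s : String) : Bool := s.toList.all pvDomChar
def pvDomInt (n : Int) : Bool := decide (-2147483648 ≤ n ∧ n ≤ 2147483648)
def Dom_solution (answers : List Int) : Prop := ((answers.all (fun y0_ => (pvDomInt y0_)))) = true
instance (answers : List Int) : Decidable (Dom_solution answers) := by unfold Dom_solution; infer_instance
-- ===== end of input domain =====

-- B replaces A's tiled strings + four-way zip loop by one counting dictionary keyed by
-- (position mod 40, character); each score becomes 40 dictionary lookups (alternative algorithm, same cost).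

-- shared first line of both Pythons: ''.join(map(str, answers)), as a char list
def pvJoin (answers : List Int) : List Char :=
  (answers.map PySem.Int.toChars).flatten

def pat1 : List Char := ['1','2','3','4','5']
def pat2 : List Char := ['2','1','2','3','2','4','2','5']
def pat3 : List Char := ['3','3','1','1','2','2','4','4','5','5']

-- ===== PORT A =====
-- A's 'for a, da1, da2, da3 in zip(...)' loop over the three score cells
def loopA : List Char → List Char → List Char → List Char → Int × Int × Int → Int × Int × Int
  | a :: s, d1 :: t1, d2 :: t2, d3 :: t3, (x, y, z) =>
      loopA s t1 t2 t3
        (x + (if a = d1 then 1 else 0), y + (if a = d2 then 1 else 0), z + (if a = d3 then 1 else 0))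
  | _, _, _, _, acc => acc

def solution (answers : List Int) : List Int :=
  let s := pvJoin answers
  let n := s.length
  -- ('12345' * (n // 5 + 1))[:n] etc.
  let m1 := ((List.replicate (n / 5 + 1) pat1).flatten).take n
  let m2 := ((List.replicate (n / 8 + 1) pat2).flatten).take n
  let m3 := ((List.replicate (n / 10 + 1) pat3).flatten).take n
  let sc := loopA s m1 m2 m3 (0, 0, 0)
  let mx := max sc.1 (max sc.2.1 sc.2.2)   -- max(mathdumbs_score)
  -- for i in range(3): if mathdumbs_score[i] == max_mds: max_md.append(i+1)
  (if sc.1 = mx then [(1 : Int)] else []) ++ (if sc.2.1 = mx then [2] else []) ++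
    (if sc.2.2 = mx then [3] else [])

-- ===== PORT B =====
-- cnt[key] = cnt.get(key, 0) + 1 over enumerate(s), key = (i % 40, c)
def cntB (s : List Char) : PySem.Dict (Int × Char) Int :=
  (PySem.List.enumerate s).foldl
    (fun d ic =>
      let k := (PySem.Int.mod ic.1 40, ic.2)
      d.insert k (d.getD k 0 + 1))
    PySem.Dict.empty

-- sum(cnt.get((r, p[r % len(p)]), 0) for r in range(40))
def scoreB (cnt : PySem.Dict (Int × Char) Int) (p : List Char) : Int :=
  ((PySem.List.pyRange 0 40 1).map
    (fun r => cnt.getD (r, PySem.List.pyGetD p (PySem.Int.mod r (p.length : Int)) ' ') 0)).sum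

def solution_alt (answers : List Int) : List Int :=
  let s := pvJoin answers
  let cnt := cntB s
  let scores := [scoreB cnt pat1, scoreB cnt pat2, scoreB cnt pat3]
  let m := (PySem.List.max? scores (fun v => v)).getD 0   -- max(scores); scores is never empty
  (PySem.List.enumerate scores).filterMap
    (fun isc => if isc.2 = m then some (isc.1 + 1) else none)

-- ===== PRECONDITION & SPEC =====
def Spec_solution (answers : List Int) (out : List Int) : Prop := out = solution_alt answers
instance (answers : List Int) (out : List Int) : Decidable (Spec_solution answers out) := by unfold Spec_solution; infer_instance

-- ===== CLAIM (what is proved, stated in full; the proofs are below) =====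
def Claim_equal_solution : Prop := ∀ (answers : List Int), Dom_solution answers → Spec_solution answers (solution answers)

-- ===== LEMMAS AND PROOFS =====

-- pairwise match count, the essence of A's zip loop
def Zc : List Char → List Char → Int
  | a :: s, b :: t => (if a = b then 1 else 0) + Zc s t
  | _, _ => 0

-- modular match count from offset i: the common form both sides are reduced to
def Wc (p : List Char) : List Char → Nat → Int
  | [], _ => 0
  | c :: s, i => (if c = p.getD (i % p.length) ' ' then 1 else 0) + Wc p s (i + 1)

theorem loopA_eq (s : List Char) : ∀ (t1 t2 t3 : List Char) (x y z : Int),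
    s.length ≤ t1.length → s.length ≤ t2.length → s.length ≤ t3.length →
    loopA s t1 t2 t3 (x, y, z) = (x + Zc s t1, y + Zc s t2, z + Zc s t3) := by
  induction s with
  | nil => intro t1 t2 t3 x y z _ _ _; simp [loopA, Zc]
  | cons a s ih =>
    intro t1 t2 t3 x y z h1 h2 h3
    cases t1 with
    | nil => simp at h1
    | cons d1 t1 =>
      cases t2 with
      | nil => simp at h2
      | cons d2 t2 =>
        cases t3 with
        | nil => simp at h3
        | cons d3 t3 =>
          simp only [loopA, Zc]
          rw [ih t1 t2 t3 _ _ _ (by simpa using h1) (by simpa using h2) (by simpa using h3)]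
          simp [add_assoc]

theorem Zc_eq_W (p : List Char) : ∀ (s t : List Char) (i : Nat),
    s.length ≤ t.length →
    (∀ j, j < s.length → t.getD j ' ' = p.getD ((i + j) % p.length) ' ') →
    Zc s t = Wc p s i := by
  intro s
  induction s with
  | nil => intro t i _ _; cases t <;> simp [Zc, Wc]
  | cons a s ih =>
    intro t i hl hj
    cases t with
    | nil => simp at hl
    | cons b t =>
      have hb : b = p.getD (i % p.length) ' ' := by
        have := hj 0 (by simp)
        simpa using this
      simp only [Zc, Wc, hb]
      congr 1
      refine ih t (i + 1) (by simpa using hl) ?_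
      intro j hjl
      have := hj (j + 1) (by simpa using Nat.succ_lt_succ hjl)
      simpa [Nat.add_assoc, Nat.add_comm 1 j, Nat.add_left_comm] using this

theorem len_tile (p : List Char) : ∀ (k : Nat), ((List.replicate k p).flatten).length = k * p.length := by
  intro k
  induction k with
  | zero => simp
  | succ k ih => simp [List.replicate_succ, ih, Nat.succ_mul]; ring

theorem getD_tile (p : List Char) : ∀ (k j : Nat), j < k * p.length →
    ((List.replicate k p).flatten).getD j ' ' = p.getD (j % p.length) ' ' := by
  intro k
  induction k with
  | zero => intro j h; simp at h
  | succ k ih =>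
    intro j h
    rw [List.replicate_succ, List.flatten_cons]
    by_cases hj : j < p.length
    · rw [List.getD_append _ _ _ _ hj, Nat.mod_eq_of_lt hj]
    · rw [Nat.not_lt] at hj
      rw [List.getD_append_right _ _ _ _ hj]
      have h' : j - p.length < k * p.length := by
        have : (k + 1) * p.length = p.length + k * p.length := by ring
        omega
      rw [ih (j - p.length) h']
      congr 1
      conv_rhs => rw [show j = p.length + (j - p.length) by omega]
      rw [Nat.add_mod_left]

theorem getD_take (xs : List Char) (n j : Nat) (h : j < n) :
    (xs.take n).getD j ' ' = xs.getD j ' ' := by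
  simp [List.getD_eq_getElem?_getD, h]

-- A's k-th score over a tiled-and-truncated pattern equals the modular count
theorem Zc_tile (s : List Char) (p : List Char)
    (hlt : s.length < (s.length / p.length + 1) * p.length) :
    Zc s (((List.replicate (s.length / p.length + 1) p).flatten).take s.length)
      = Wc p s 0 := by
  apply Zc_eq_W
  · rw [List.length_take, len_tile]; omega
  · intro j hjl
    rw [getD_take _ _ _ hjl, getD_tile p _ j (by omega)]
    simp

-- ===== B-side lemmas =====

-- the keyed list B's counting loop counts over
def keyed (s : List Char) (i : Int) : List (Int × Char) :=
  (PySem.List.enumerate s i).map (fun ic => (PySem.Int.mod ic.1 40, ic.2))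

theorem count_cons_int (a x : Int × Char) (l : List (Int × Char)) :
    ((x :: l).count a : Int) = (l.count a : Int) + (if a = x then 1 else 0) := by
  rw [List.count_cons]
  by_cases h : a = x
  · simp [h]
  · simp [h]; exact fun e => h e.symm

theorem sum_indicator (g : Int → Char) (c : Char) (r0 : Int) :
    ∀ (l : List Int), l.Nodup → r0 ∈ l →
    (l.map (fun r => if ((r0, c) : Int × Char) = (r, g r) then (1 : Int) else 0)).sum
      = if c = g r0 then 1 else 0 := by
  intro l
  induction l with
  | nil => intro _ h; simp at h
  | cons r l ih =>
    intro hn hm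
    have hnd := (List.nodup_cons.mp hn)
    simp only [List.map_cons, List.sum_cons]
    by_cases hr : r = r0
    · subst hr
      have hz : (l.map (fun r' => if ((r, c) : Int × Char) = (r', g r') then (1 : Int) else 0)).sum = 0 := by
        refine List.sum_eq_zero ?_
        intro x hx
        obtain ⟨r', hr', rfl⟩ := List.mem_map.mp hx
        have hne : r ≠ r' := fun h => hnd.1 (h ▸ hr')
        simp [Prod.ext_iff, hne]
      rw [hz, add_zero]
      by_cases hc : c = g r
      · simp [hc]
      · have hgc : ¬ c = g r := hc
        simp [Prod.ext_iff, hgc]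
    · have hm' : r0 ∈ l := by cases hm with | head => exact absurd rfl hr | tail _ h => exact h
      rw [ih hnd.2 hm']
      have hne : ¬ (((r0, c) : Int × Char) = (r, g r)) := by
        simp [Prod.ext_iff]; intro h; exact absurd h.symm hr
      simp [hne]

theorem count_sum_eq_W (p : List Char) (hdvd : p.length ∣ 40) :
    ∀ (s : List Char) (k : Nat),
    ((PySem.List.pyRange 0 40 1).map
      (fun r => ((keyed s (k : Int)).count
        (r, PySem.List.pyGetD p (PySem.Int.mod r (p.length : Int)) ' ') : Int))).sum
      = Wc p s k := by
  intro s
  induction s with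
  | nil =>
    intro k
    simp [keyed, PySem.List.enumerate_nil, Wc]
  | cons c s ih =>
    intro k
    have hkey : keyed (c :: s) (k : Int)
        = ((((k % 40 : Nat) : Int), c)) :: keyed s ((k + 1 : Nat) : Int) := by
      unfold keyed
      rw [PySem.List.enumerate_cons, List.map_cons]
      congr 2
      exact_mod_cast PySem.Int.mod_natCast k 40
    rw [hkey]
    have hsplit : (PySem.List.pyRange 0 40 1).map
        (fun r => ((((((k % 40 : Nat) : Int), c)) :: keyed s ((k + 1 : Nat) : Int)).count
          (r, PySem.List.pyGetD p (PySem.Int.mod r (p.length : Int)) ' ') : Int))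
        = (PySem.List.pyRange 0 40 1).map
        (fun r => ((keyed s ((k + 1 : Nat) : Int)).count
            (r, PySem.List.pyGetD p (PySem.Int.mod r (p.length : Int)) ' ') : Int)
          + (if (((((k % 40 : Nat) : Int), c)) : Int × Char)
               = (r, PySem.List.pyGetD p (PySem.Int.mod r (p.length : Int)) ' ') then 1 else 0)) := by
      refine List.map_congr_left ?_
      intro r _
      rw [count_cons_int]
      congr 1
      exact if_congr eq_comm rfl rfl
    rw [hsplit, PySem.List.sum_map_add_int, ih (k + 1)]
    have hind := sum_indicator
        (fun r => PySem.List.pyGetD p (PySem.Int.mod r (p.length : Int)) ' ') c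
        (((k % 40 : Nat) : Int)) (PySem.List.pyRange 0 40 1)
        (PySem.List.nodup_pyRange_one 0 40)
        (by rw [PySem.List.mem_pyRange_one]
            constructor
            · positivity
            · exact_mod_cast Nat.mod_lt k (by norm_num))
    rw [hind]
    have hmods : PySem.List.pyGetD p (PySem.Int.mod (((k % 40 : Nat) : Int)) (p.length : Int)) ' '
        = p.getD (k % p.length) ' ' := by
      rw [PySem.Int.mod_natCast, PySem.List.pyGetD_natCast]
      congr 1
      exact Nat.mod_mod_of_dvd k hdvd
    simp only [hmods, Wc]
    ring

theorem cntB_eq_counter (s : List Char) :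
    cntB s = PySem.Dict.counter (keyed s 0) := by
  unfold cntB keyed
  rw [← PySem.Dict.foldl_insert_getD_add_one_eq_counter, List.foldl_map]

-- ===== VERDICT helper: the final assembly =====
theorem solution_spec : Claim_equal_solution := by
  unfold Claim_equal_solution
  intro answers _
  unfold Spec_solution solution solution_alt
  simp only []
  set s := pvJoin answers with hs
  have h5 : Zc s (((List.replicate (s.length / 5 + 1) pat1).flatten).take s.length) = Wc pat1 s 0 := by
    have := Zc_tile s pat1 (by simp [pat1]; omega)
    simpa [pat1] using this
  have h8 : Zc s (((List.replicate (s.length / 8 + 1) pat2).flatten).take s.length) = Wc pat2 s 0 := by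
    have := Zc_tile s pat2 (by simp [pat2]; omega)
    simpa [pat2] using this
  have h10 : Zc s (((List.replicate (s.length / 10 + 1) pat3).flatten).take s.length) = Wc pat3 s 0 := by
    have := Zc_tile s pat3 (by simp [pat3]; omega)
    simpa [pat3] using this
  have hB : ∀ (p : List Char), p.length ∣ 40 → scoreB (cntB s) p = Wc p s 0 := by
    intro p hdvd
    unfold scoreB
    rw [cntB_eq_counter]
    have hW := count_sum_eq_W p hdvd s 0
    rw [← hW]
    refine congrArg List.sum (List.map_congr_left ?_)
    intro r _
    rw [PySem.Dict.getD_counter]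
    norm_num
  have hB1 : scoreB (cntB s) pat1 = Wc pat1 s 0 := hB pat1 (by simp [pat1])
  have hB2 : scoreB (cntB s) pat2 = Wc pat2 s 0 := hB pat2 (by simp [pat2])
  have hB3 : scoreB (cntB s) pat3 = Wc pat3 s 0 := hB pat3 (by simp [pat3])
  rw [loopA_eq]
  · simp only [h5, h8, h10, zero_add, hB1, hB2, hB3]
    rw [PySem.List.max?_id_cons]
    simp only [List.foldl, Option.getD_some, PySem.List.enumerate_cons, PySem.List.enumerate_nil,
      List.filterMap_cons, List.filterMap_nil]
    have hmax : max (Wc pat1 s 0) (max (Wc pat2 s 0) (Wc pat3 s 0))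
        = max (max (Wc pat1 s 0) (Wc pat2 s 0)) (Wc pat3 s 0) := (max_assoc _ _ _).symm
    rw [hmax]
    split_ifs <;> norm_num
  · rw [List.length_take, len_tile]; simp [pat1]; omega
  · rw [List.length_take, len_tile]; simp [pat2]; omega
  · rw [List.length_take, len_tile]; simp [pat3]; omega
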